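-- pv_equiv track=rewrite | github.com/math-eaton/GRID3_mapProduction | scripts/preprocess/extractSpreadsheetImages.py | replace_keywords
-- ===== SOURCE A (Python) =====
-- def replace_keywords(text):
--     replacements = {
--         "zonestante": "ZS",
--         "airesante": "AS",
--         "localite": "LOCALITE",
--         "_": " "
--     }
--     for old, new in replacements.items():
--         text = text.replace(old, new)
--     return text
-- ===== SOURCE B (Python) =====
-- def replace_keywords(text):
--     # One left-to-right scan doing all four substitutions simultaneously
--     # (no key overlaps another or appears in a replacement, so this equals
--     # the sequential four-pass replace).
--     repl = {
--         "zonestante": "ZS",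
--         "airesante": "AS",
--         "localite": "LOCALITE",
--         "_": " "
--     }
--     out = []
--     i = 0
--     n = len(text)
--     while i < n:
--         for key, val in repl.items():
--             if text.startswith(key, i):
--                 out.append(val)
--                 i += len(key)
--                 break
--         else:
--             out.append(text[i])
--             i += 1
--     return "".join(out)
-- ===== Notes on version B (the rewrite author's own statement) =====
-- stated objective: alternative
-- what changed: Replaces the four chained full-string str.replace passes by a single left-to-right scan that tries the four keys at each position and substitutes simultaneously (correct because no key overlaps another and no replacement contains a key).
import Mathlib
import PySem

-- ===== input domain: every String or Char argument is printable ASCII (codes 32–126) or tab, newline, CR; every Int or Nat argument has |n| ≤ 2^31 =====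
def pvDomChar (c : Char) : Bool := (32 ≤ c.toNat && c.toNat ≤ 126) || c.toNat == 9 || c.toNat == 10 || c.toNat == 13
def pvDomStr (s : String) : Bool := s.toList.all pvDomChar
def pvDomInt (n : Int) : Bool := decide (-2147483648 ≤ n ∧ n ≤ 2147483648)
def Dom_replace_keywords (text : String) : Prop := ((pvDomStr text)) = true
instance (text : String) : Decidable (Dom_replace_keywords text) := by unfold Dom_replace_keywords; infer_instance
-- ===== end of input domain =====

-- B replaces A's four chained full-string `replace` passes by a single left-to-right
-- scan substituting all four keys simultaneously (an 'alternative' decomposition,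
-- same cost; equal because no key overlaps another and no replacement contains a key).

-- ===== PORT A =====
-- A builds a dict of replacements and folds str.replace over its items.
def replace_keywords (text : String) : String :=
  let replacements : PySem.Dict String String :=
    ((((PySem.Dict.empty).insert "zonestante" "ZS").insert "airesante" "AS").insert
        "localite" "LOCALITE").insert "_" " "
  replacements.items.foldl (fun t kv => PySem.Str.replace t kv.1 kv.2) text

-- ===== PORT B =====
-- B's single scan: at each position try the four keys in dict order
-- (`text.startswith(key, i)`), emit the replacement and skip the key, else copy the char.
def pvScanB : List Char → List Char
  | [] => []
  | c :: t =>
    if ("zonestante".toList).isPrefixOf (c :: t) then "ZS".toList ++ pvScanB (t.drop 9)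
    else if ("airesante".toList).isPrefixOf (c :: t) then "AS".toList ++ pvScanB (t.drop 8)
    else if ("localite".toList).isPrefixOf (c :: t) then "LOCALITE".toList ++ pvScanB (t.drop 7)
    else if ("_".toList).isPrefixOf (c :: t) then " ".toList ++ pvScanB t
    else c :: pvScanB t
  termination_by l => l.length
  decreasing_by all_goals (simp [List.length_drop]; try omega)

def replace_keywords_alt (text : String) : String := String.ofList (pvScanB text.toList)

-- ===== PRECONDITION & SPEC =====
def Spec_replace_keywords (text : String) (out : String) : Prop := out = replace_keywords_alt text
instance (text : String) (out : String) : Decidable (Spec_replace_keywords text out) := by unfold Spec_replace_keywords; infer_instance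

-- ===== CLAIM (what is proved, stated in full; the proofs are below) =====
def Claim_equal_replace_keywords : Prop := ∀ (text : String), Dom_replace_keywords text → Spec_replace_keywords text (replace_keywords text)

-- ===== LEMMAS AND PROOFS =====

-- A fuel-free version of PySem.Chars.replace for a nonempty pattern.
def pvRep (oh : Char) (ot nw : List Char) : List Char → List Char
  | [] => []
  | c :: t =>
    if (oh :: ot).isPrefixOf (c :: t) then nw ++ pvRep oh ot nw (t.drop ot.length)
    else c :: pvRep oh ot nw t
  termination_by l => l.length
  decreasing_by all_goals (simp [List.length_drop]; try omega)

lemma pvRep_nil (oh : Char) (ot nw : List Char) : pvRep oh ot nw [] = [] := by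
  simp [pvRep]

lemma pvRep_cons_pos (oh : Char) (ot nw : List Char) (c : Char) (t : List Char)
    (h : (oh :: ot).isPrefixOf (c :: t) = true) :
    pvRep oh ot nw (c :: t) = nw ++ pvRep oh ot nw (t.drop ot.length) := by
  rw [pvRep]; simp [h]

lemma pvRep_cons_neg (oh : Char) (ot nw : List Char) (c : Char) (t : List Char)
    (h : ¬ (oh :: ot).isPrefixOf (c :: t) = true) :
    pvRep oh ot nw (c :: t) = c :: pvRep oh ot nw t := by
  rw [pvRep]; simp [h]

lemma go_eq_pvRep (oh : Char) (ot nw : List Char) :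
    ∀ (fuel : Nat) (l acc : List Char), l.length ≤ fuel →
      PySem.Chars.replace.go (oh :: ot) nw fuel l acc = acc.reverse ++ pvRep oh ot nw l := by
  intro fuel
  induction fuel with
  | zero =>
    intro l acc h
    have : l = [] := by cases l <;> simp_all
    subst this
    rw [PySem.Chars.replace.go.eq_def]; simp [pvRep_nil]
  | succ n ih =>
    intro l acc h
    cases l with
    | nil => rw [PySem.Chars.replace.go.eq_def]; simp [pvRep_nil]
    | cons c t =>
      rw [PySem.Chars.replace.go.eq_def]
      by_cases hp : (oh :: ot).isPrefixOf (c :: t) = true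
      · simp only [hp, if_true]
        rw [ih (List.drop (oh :: ot).length (c :: t)) (nw.reverse ++ acc)
            (by simp [List.length_drop] at *; omega)]
        rw [pvRep_cons_pos oh ot nw c t hp]
        simp
      · simp only [hp]
        rw [ih t (c :: acc) (by simp at h; omega)]
        rw [pvRep_cons_neg oh ot nw c t hp]
        simp

lemma replace_eq_pvRep (s : List Char) (oh : Char) (ot nw : List Char) :
    PySem.Chars.replace s (oh :: ot) nw = pvRep oh ot nw s := by
  rw [PySem.Chars.replace]
  simp only [List.isEmpty_cons, Bool.false_eq_true, if_false]
  rw [go_eq_pvRep oh ot nw s.length s [] le_rfl]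
  simp

-- matched head: pvRep (old ++ r) = nw ++ pvRep r
lemma pvRep_match (oh : Char) (ot nw r : List Char) :
    pvRep oh ot nw ((oh :: ot) ++ r) = nw ++ pvRep oh ot nw r := by
  have hp : (oh :: ot).isPrefixOf (oh :: (ot ++ r)) = true := by
    rw [List.isPrefixOf_iff_prefix]; exact ⟨r, by simp⟩
  have := pvRep_cons_pos oh ot nw oh (ot ++ r) hp
  simpa [List.drop_left] using this

-- a block a with no interaction with the pattern passes through unchanged
abbrev pvSep (a old : List Char) : Prop :=
  ∀ i < a.length, ¬ old.isPrefixOf (a.drop i) = true ∧ ¬ (a.drop i).isPrefixOf old = true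

lemma pvSep_tail (c : Char) (a old : List Char) (h : pvSep (c :: a) old) : pvSep a old := by
  intro i hi
  have := h (i + 1) (by simp; omega)
  simpa using this

lemma pvRep_append (oh : Char) (ot nw : List Char) (a x : List Char)
    (h : pvSep a (oh :: ot)) :
    pvRep oh ot nw (a ++ x) = a ++ pvRep oh ot nw x := by
  induction a with
  | nil => simp
  | cons c a' ih =>
    have hnp : ¬ (oh :: ot).isPrefixOf (c :: (a' ++ x)) = true := by
      intro hp
      rw [List.isPrefixOf_iff_prefix] at hp
      have ha : (c :: a') <+: (c :: a') ++ x := List.prefix_append _ _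
      have hp' : (oh :: ot) <+: (c :: a') ++ x := by simpa using hp
      have h0 := h 0 (by simp)
      rcases Nat.le_total (oh :: ot).length (c :: a').length with hle | hle
      · exact h0.1 (by
          rw [List.isPrefixOf_iff_prefix]
          simpa using List.prefix_of_prefix_length_le hp' ha hle)
      · exact h0.2 (by
          rw [List.isPrefixOf_iff_prefix]
          simpa using List.prefix_of_prefix_length_le ha hp' hle)
    rw [List.cons_append, pvRep_cons_neg oh ot nw c (a' ++ x) hnp,
        ih (pvSep_tail c a' (oh :: ot) h)]
    simp

-- no occurrence anywhere: identity
lemma pvRep_id (oh : Char) (ot nw : List Char) (x : List Char)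
    (h : ∀ j, ¬ (oh :: ot).isPrefixOf (x.drop j) = true) : pvRep oh ot nw x = x := by
  induction x with
  | nil => exact pvRep_nil _ _ _
  | cons c t ih =>
    rw [pvRep_cons_neg oh ot nw c t (by simpa using h 0)]
    rw [ih (fun j => by simpa using h (j + 1))]

-- skip a match-free region
lemma pvRep_skip (oh : Char) (ot nw : List Char) :
    ∀ (m : Nat) (x : List Char), m ≤ x.length →
      (∀ j < m, ¬ (oh :: ot).isPrefixOf (x.drop j) = true) →
      pvRep oh ot nw x = x.take m ++ pvRep oh ot nw (x.drop m) := by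
  intro m
  induction m with
  | zero => intro x _ _; simp
  | succ n ih =>
    intro x hm h
    cases x with
    | nil => simp at hm
    | cons c t =>
      rw [pvRep_cons_neg oh ot nw c t (by simpa using h 0 (by omega))]
      rw [ih t (by simp at hm; omega) (fun j hj => by simpa using h (j + 1) (by omega))]
      simp

-- key lemma: a pattern that does not occur at the front and whose chars avoid nw
-- still does not occur at the front after one replacement pass
lemma pvRep_not_prefix (oh : Char) (ot : List Char) (nh : Char) (nt : List Char)
    (p x : List Char)
    (hdisj : ∀ a ∈ p, a ∉ (nh :: nt))
    (h1 : ¬ (oh :: ot).isPrefixOf x = true)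
    (h2 : ¬ p <+: x) :
    ¬ p <+: pvRep oh ot (nh :: nt) x := by
  by_cases hocc : ∃ j, (oh :: ot) <+: x.drop j
  · have hdec : DecidablePred (fun j => (oh :: ot) <+: x.drop j) := fun j => inferInstance
    set i := Nat.find hocc with hidef
    have hspec : (oh :: ot) <+: x.drop i := Nat.find_spec hocc
    have hmin : ∀ j < i, ¬ (oh :: ot) <+: x.drop j := fun j hj => Nat.find_min hocc hj
    have hi0 : i ≠ 0 := by
      intro h0
      apply h1
      rw [List.isPrefixOf_iff_prefix]
      simpa [h0] using hspec
    have hilen : i < x.length := by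
      by_contra hge
      have : x.drop i = [] := List.drop_eq_nil_of_le (by omega)
      rw [this] at hspec
      exact absurd (List.prefix_nil.mp hspec) (by simp)
    obtain ⟨r, hr⟩ := hspec
    have hrw : pvRep oh ot (nh :: nt) x
        = x.take i ++ ((nh :: nt) ++ pvRep oh ot (nh :: nt) r) := by
      rw [pvRep_skip oh ot (nh :: nt) i x (by omega)
          (fun j hj => by rw [List.isPrefixOf_iff_prefix]; exact hmin j hj)]
      congr 1
      rw [← hr, pvRep_match]
    intro hp
    rw [hrw] at hp
    obtain ⟨q, hq⟩ := hp
    rcases Nat.lt_or_ge i p.length with hlt | hle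
    · -- position i of the result is nh, which cannot be a char of p
      have hpi : (p ++ q)[i]? = some p[i] := by
        rw [List.getElem?_append_left hlt]
        simp [hlt]
      have hyi : (x.take i ++ ((nh :: nt) ++ pvRep oh ot (nh :: nt) r))[i]? = some nh := by
        rw [List.getElem?_append_right (by simp)]
        simp [Nat.min_eq_left (Nat.le_of_lt hilen)]
      rw [hq] at hpi
      rw [hpi] at hyi
      have : p[i] = nh := by injection hyi
      exact absurd (this ▸ List.getElem_mem _) (fun hm => hdisj nh hm (by simp))
    · -- p lies inside the untouched prefix, so p is a prefix of x
      apply h2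
      have htake : (p ++ q).take p.length
          = (x.take i ++ ((nh :: nt) ++ pvRep oh ot (nh :: nt) r)).take p.length := by
        rw [hq]
      rw [List.take_left] at htake
      rw [List.take_append_of_le_length (by simp; omega)] at htake
      rw [List.take_take, Nat.min_eq_left hle] at htake
      exact htake ▸ List.take_prefix p.length x
  · rw [pvRep_id oh ot (nh :: nt) x
        (fun j hj => hocc ⟨j, List.isPrefixOf_iff_prefix.mp hj⟩)]
    exact h2

-- the four keys and replacements as literal char lists
-- k1 = "zonestante", k2 = "airesante", k3 = "localite", k4 = "_"

lemma scan_nil : pvScanB [] = [] := by rw [pvScanB]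

lemma scan_cons1 (c : Char) (t : List Char)
    (h1 : List.isPrefixOf ('z' :: ['o','n','e','s','t','a','n','t','e']) (c :: t) = true) :
    pvScanB (c :: t) = ['Z','S'] ++ pvScanB (t.drop 9) := by
  rw [pvScanB]
  simp only [show "zonestante".toList = 'z' :: ['o','n','e','s','t','a','n','t','e'] from rfl,
    show "ZS".toList = ['Z','S'] from rfl, h1, if_true]

lemma scan_cons2 (c : Char) (t : List Char)
    (h1 : ¬ List.isPrefixOf ('z' :: ['o','n','e','s','t','a','n','t','e']) (c :: t) = true)
    (h2 : List.isPrefixOf ('a' :: ['i','r','e','s','a','n','t','e']) (c :: t) = true) :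
    pvScanB (c :: t) = ['A','S'] ++ pvScanB (t.drop 8) := by
  rw [pvScanB]
  simp only [show "zonestante".toList = 'z' :: ['o','n','e','s','t','a','n','t','e'] from rfl,
    show "airesante".toList = 'a' :: ['i','r','e','s','a','n','t','e'] from rfl,
    show "AS".toList = ['A','S'] from rfl]
  simp [h1, h2]

lemma scan_cons3 (c : Char) (t : List Char)
    (h1 : ¬ List.isPrefixOf ('z' :: ['o','n','e','s','t','a','n','t','e']) (c :: t) = true)
    (h2 : ¬ List.isPrefixOf ('a' :: ['i','r','e','s','a','n','t','e']) (c :: t) = true)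
    (h3 : List.isPrefixOf ('l' :: ['o','c','a','l','i','t','e']) (c :: t) = true) :
    pvScanB (c :: t) = ['L','O','C','A','L','I','T','E'] ++ pvScanB (t.drop 7) := by
  rw [pvScanB]
  simp only [show "zonestante".toList = 'z' :: ['o','n','e','s','t','a','n','t','e'] from rfl,
    show "airesante".toList = 'a' :: ['i','r','e','s','a','n','t','e'] from rfl,
    show "localite".toList = 'l' :: ['o','c','a','l','i','t','e'] from rfl,
    show "LOCALITE".toList = ['L','O','C','A','L','I','T','E'] from rfl,
    ]
  simp [h1, h2, h3]

lemma scan_cons4 (c : Char) (t : List Char)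
    (h1 : ¬ List.isPrefixOf ('z' :: ['o','n','e','s','t','a','n','t','e']) (c :: t) = true)
    (h2 : ¬ List.isPrefixOf ('a' :: ['i','r','e','s','a','n','t','e']) (c :: t) = true)
    (h3 : ¬ List.isPrefixOf ('l' :: ['o','c','a','l','i','t','e']) (c :: t) = true)
    (h4 : List.isPrefixOf ('_' :: []) (c :: t) = true) :
    pvScanB (c :: t) = [' '] ++ pvScanB t := by
  rw [pvScanB]
  simp only [show "zonestante".toList = 'z' :: ['o','n','e','s','t','a','n','t','e'] from rfl,
    show "airesante".toList = 'a' :: ['i','r','e','s','a','n','t','e'] from rfl,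
    show "localite".toList = 'l' :: ['o','c','a','l','i','t','e'] from rfl,
    show "_".toList = '_' :: [] from rfl, show " ".toList = [' '] from rfl,
    ]
  simp [h1, h2, h3, h4]

lemma scan_cons5 (c : Char) (t : List Char)
    (h1 : ¬ List.isPrefixOf ('z' :: ['o','n','e','s','t','a','n','t','e']) (c :: t) = true)
    (h2 : ¬ List.isPrefixOf ('a' :: ['i','r','e','s','a','n','t','e']) (c :: t) = true)
    (h3 : ¬ List.isPrefixOf ('l' :: ['o','c','a','l','i','t','e']) (c :: t) = true)
    (h4 : ¬ List.isPrefixOf ('_' :: []) (c :: t) = true) :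
    pvScanB (c :: t) = c :: pvScanB t := by
  rw [pvScanB]
  simp only [show "zonestante".toList = 'z' :: ['o','n','e','s','t','a','n','t','e'] from rfl,
    show "airesante".toList = 'a' :: ['i','r','e','s','a','n','t','e'] from rfl,
    show "localite".toList = 'l' :: ['o','c','a','l','i','t','e'] from rfl,
    show "_".toList = '_' :: [] from rfl,
    ]
  simp [h1, h2, h3, h4]

lemma comp_eq_scan : ∀ (n : Nat) (l : List Char), l.length ≤ n →
    pvRep '_' [] [' ']
      (pvRep 'l' ['o','c','a','l','i','t','e'] ['L','O','C','A','L','I','T','E']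
        (pvRep 'a' ['i','r','e','s','a','n','t','e'] ['A','S']
          (pvRep 'z' ['o','n','e','s','t','a','n','t','e'] ['Z','S'] l))) = pvScanB l := by
  intro n
  induction n with
  | zero =>
    intro l hl
    have : l = [] := by cases l <;> simp_all
    subst this
    simp [pvRep_nil, scan_nil]
  | succ n ih =>
    intro l hl
    cases l with
    | nil => simp [pvRep_nil, scan_nil]
    | cons c t =>
      by_cases h1 : List.isPrefixOf ('z' :: ['o','n','e','s','t','a','n','t','e']) (c :: t) = true
      · -- "zonestante" at the front
        obtain ⟨r, hr⟩ := List.isPrefixOf_iff_prefix.mp h1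
        have hrd : r = t.drop 9 := by
          have := congrArg (List.drop 10) hr
          simpa using this
        rw [scan_cons1 c t h1, ← hrd, ← hr]
        rw [pvRep_match 'z' ['o','n','e','s','t','a','n','t','e'] ['Z','S'] r]
        rw [pvRep_append 'a' ['i','r','e','s','a','n','t','e'] ['A','S'] ['Z','S'] _ (by decide)]
        rw [pvRep_append 'l' ['o','c','a','l','i','t','e'] ['L','O','C','A','L','I','T','E'] ['Z','S'] _ (by decide)]
        rw [pvRep_append '_' [] [' '] ['Z','S'] _ (by decide)]
        rw [ih r (by have hlen := congrArg List.length hr; simp at hlen hl; omega)]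
      · by_cases h2 : List.isPrefixOf ('a' :: ['i','r','e','s','a','n','t','e']) (c :: t) = true
        · -- "airesante" at the front
          obtain ⟨r, hr⟩ := List.isPrefixOf_iff_prefix.mp h2
          have hrd : r = t.drop 8 := by
            have := congrArg (List.drop 9) hr
            simpa using this
          rw [scan_cons2 c t h1 h2, ← hrd, ← hr]
          rw [pvRep_append 'z' ['o','n','e','s','t','a','n','t','e'] ['Z','S'] ('a' :: ['i','r','e','s','a','n','t','e']) _ (by decide)]
          rw [pvRep_match 'a' ['i','r','e','s','a','n','t','e'] ['A','S'] _]
          rw [pvRep_append 'l' ['o','c','a','l','i','t','e'] ['L','O','C','A','L','I','T','E'] ['A','S'] _ (by decide)]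
          rw [pvRep_append '_' [] [' '] ['A','S'] _ (by decide)]
          rw [ih r (by have hlen := congrArg List.length hr; simp at hlen hl; omega)]
        · by_cases h3 : List.isPrefixOf ('l' :: ['o','c','a','l','i','t','e']) (c :: t) = true
          · -- "localite" at the front
            obtain ⟨r, hr⟩ := List.isPrefixOf_iff_prefix.mp h3
            have hrd : r = t.drop 7 := by
              have := congrArg (List.drop 8) hr
              simpa using this
            rw [scan_cons3 c t h1 h2 h3, ← hrd, ← hr]
            rw [pvRep_append 'z' ['o','n','e','s','t','a','n','t','e'] ['Z','S'] ('l' :: ['o','c','a','l','i','t','e']) _ (by decide)]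
            rw [pvRep_append 'a' ['i','r','e','s','a','n','t','e'] ['A','S'] ('l' :: ['o','c','a','l','i','t','e']) _ (by decide)]
            rw [pvRep_match 'l' ['o','c','a','l','i','t','e'] ['L','O','C','A','L','I','T','E'] _]
            rw [pvRep_append '_' [] [' '] ['L','O','C','A','L','I','T','E'] _ (by decide)]
            rw [ih r (by have hlen := congrArg List.length hr; simp at hlen hl; omega)]
          · by_cases h4 : List.isPrefixOf ('_' :: []) (c :: t) = true
            · -- "_" at the front: c = '_'
              have hc : c = '_' := by
                obtain ⟨r, hr⟩ := List.isPrefixOf_iff_prefix.mp h4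
                have h' : '_' :: r = c :: t := hr
                injection h' with hc' _
                exact hc'.symm
              subst hc
              rw [scan_cons4 '_' t h1 h2 h3 h4]
              rw [show ('_' :: t) = ['_'] ++ t from rfl]
              rw [pvRep_append 'z' ['o','n','e','s','t','a','n','t','e'] ['Z','S'] ['_'] _ (by decide)]
              rw [pvRep_append 'a' ['i','r','e','s','a','n','t','e'] ['A','S'] ['_'] _ (by decide)]
              rw [pvRep_append 'l' ['o','c','a','l','i','t','e'] ['L','O','C','A','L','I','T','E'] ['_'] _ (by decide)]
              rw [pvRep_match '_' [] [' '] _]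
              rw [ih t (by simp at hl; omega)]
            · -- no key at the front: the head character passes through all four passes
              have h2' : ¬ ('a' :: ['i','r','e','s','a','n','t','e']) <+: (c :: t) :=
                fun hp => h2 (List.isPrefixOf_iff_prefix.mpr hp)
              have h3' : ¬ ('l' :: ['o','c','a','l','i','t','e']) <+: (c :: t) :=
                fun hp => h3 (List.isPrefixOf_iff_prefix.mpr hp)
              have h4' : ¬ ('_' :: []) <+: (c :: t) :=
                fun hp => h4 (List.isPrefixOf_iff_prefix.mpr hp)
              have np2 : ¬ ('a' :: ['i','r','e','s','a','n','t','e']) <+: pvRep 'z' ['o','n','e','s','t','a','n','t','e'] ['Z','S'] (c :: t) :=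
                pvRep_not_prefix 'z' ['o','n','e','s','t','a','n','t','e'] 'Z' ['S'] _ _ (by simp) h1 h2'
              have np3 : ¬ ('l' :: ['o','c','a','l','i','t','e']) <+: pvRep 'z' ['o','n','e','s','t','a','n','t','e'] ['Z','S'] (c :: t) :=
                pvRep_not_prefix 'z' ['o','n','e','s','t','a','n','t','e'] 'Z' ['S'] _ _ (by simp) h1 h3'
              have np4 : ¬ ('_' :: []) <+: pvRep 'z' ['o','n','e','s','t','a','n','t','e'] ['Z','S'] (c :: t) :=
                pvRep_not_prefix 'z' ['o','n','e','s','t','a','n','t','e'] 'Z' ['S'] _ _ (by simp) h1 h4'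
              have np3b : ¬ ('l' :: ['o','c','a','l','i','t','e']) <+: pvRep 'a' ['i','r','e','s','a','n','t','e'] ['A','S'] (pvRep 'z' ['o','n','e','s','t','a','n','t','e'] ['Z','S'] (c :: t)) :=
                pvRep_not_prefix 'a' ['i','r','e','s','a','n','t','e'] 'A' ['S'] _ _ (by simp)
                  (fun hp => np2 (List.isPrefixOf_iff_prefix.mp hp)) np3
              have np4b : ¬ ('_' :: []) <+: pvRep 'a' ['i','r','e','s','a','n','t','e'] ['A','S'] (pvRep 'z' ['o','n','e','s','t','a','n','t','e'] ['Z','S'] (c :: t)) :=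
                pvRep_not_prefix 'a' ['i','r','e','s','a','n','t','e'] 'A' ['S'] _ _ (by simp)
                  (fun hp => np2 (List.isPrefixOf_iff_prefix.mp hp)) np4
              have np4c : ¬ ('_' :: []) <+: pvRep 'l' ['o','c','a','l','i','t','e'] ['L','O','C','A','L','I','T','E']
                  (pvRep 'a' ['i','r','e','s','a','n','t','e'] ['A','S'] (pvRep 'z' ['o','n','e','s','t','a','n','t','e'] ['Z','S'] (c :: t))) :=
                pvRep_not_prefix 'l' ['o','c','a','l','i','t','e'] 'L' ['O','C','A','L','I','T','E'] _ _ (by simp)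
                  (fun hp => np3b (List.isPrefixOf_iff_prefix.mp hp)) np4b
              have s1 : pvRep 'z' ['o','n','e','s','t','a','n','t','e'] ['Z','S'] (c :: t) = c :: pvRep 'z' ['o','n','e','s','t','a','n','t','e'] ['Z','S'] t :=
                pvRep_cons_neg _ _ _ _ _ h1
              rw [s1] at np2 np3b np4b np4c
              have s2 : pvRep 'a' ['i','r','e','s','a','n','t','e'] ['A','S'] (c :: pvRep 'z' ['o','n','e','s','t','a','n','t','e'] ['Z','S'] t)
                  = c :: pvRep 'a' ['i','r','e','s','a','n','t','e'] ['A','S'] (pvRep 'z' ['o','n','e','s','t','a','n','t','e'] ['Z','S'] t) :=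
                pvRep_cons_neg _ _ _ _ _ (fun hp => np2 (List.isPrefixOf_iff_prefix.mp hp))
              rw [s2] at np3b np4c
              have s3 : pvRep 'l' ['o','c','a','l','i','t','e'] ['L','O','C','A','L','I','T','E'] (c :: pvRep 'a' ['i','r','e','s','a','n','t','e'] ['A','S'] (pvRep 'z' ['o','n','e','s','t','a','n','t','e'] ['Z','S'] t))
                  = c :: pvRep 'l' ['o','c','a','l','i','t','e'] ['L','O','C','A','L','I','T','E'] (pvRep 'a' ['i','r','e','s','a','n','t','e'] ['A','S'] (pvRep 'z' ['o','n','e','s','t','a','n','t','e'] ['Z','S'] t)) :=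
                pvRep_cons_neg _ _ _ _ _ (fun hp => np3b (List.isPrefixOf_iff_prefix.mp hp))
              rw [s3] at np4c
              have s4 : pvRep '_' [] [' ']
                    (c :: pvRep 'l' ['o','c','a','l','i','t','e'] ['L','O','C','A','L','I','T','E'] (pvRep 'a' ['i','r','e','s','a','n','t','e'] ['A','S'] (pvRep 'z' ['o','n','e','s','t','a','n','t','e'] ['Z','S'] t)))
                  = c :: pvRep '_' [] [' ']
                    (pvRep 'l' ['o','c','a','l','i','t','e'] ['L','O','C','A','L','I','T','E'] (pvRep 'a' ['i','r','e','s','a','n','t','e'] ['A','S'] (pvRep 'z' ['o','n','e','s','t','a','n','t','e'] ['Z','S'] t))) :=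
                pvRep_cons_neg _ _ _ _ _ (fun hp => np4c (List.isPrefixOf_iff_prefix.mp hp))
              rw [s1, s2, s3, s4, scan_cons5 c t h1 h2 h3 h4, ih t (by simp at hl; omega)]

-- ===== VERDICT (by name: the statement is the Claim_ definition above) =====
theorem replace_keywords_spec : Claim_equal_replace_keywords := by
  intro text _
  unfold Spec_replace_keywords
  have hA : replace_keywords text =
      PySem.Str.replace (PySem.Str.replace (PySem.Str.replace
        (PySem.Str.replace text "zonestante" "ZS") "airesante" "AS") "localite" "LOCALITE")
        "_" " " := rfl
  have e1 : ∀ (l : List Char), PySem.Chars.replace l ("zonestante" : String).toList ("ZS" : String).toList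
      = pvRep 'z' ['o','n','e','s','t','a','n','t','e'] ['Z','S'] l :=
    fun l => replace_eq_pvRep l 'z' ['o','n','e','s','t','a','n','t','e'] ['Z','S']
  have e2 : ∀ (l : List Char), PySem.Chars.replace l ("airesante" : String).toList ("AS" : String).toList
      = pvRep 'a' ['i','r','e','s','a','n','t','e'] ['A','S'] l :=
    fun l => replace_eq_pvRep l 'a' ['i','r','e','s','a','n','t','e'] ['A','S']
  have e3 : ∀ (l : List Char), PySem.Chars.replace l ("localite" : String).toList ("LOCALITE" : String).toList
      = pvRep 'l' ['o','c','a','l','i','t','e'] ['L','O','C','A','L','I','T','E'] l :=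
    fun l => replace_eq_pvRep l 'l' ['o','c','a','l','i','t','e'] ['L','O','C','A','L','I','T','E']
  have e4 : ∀ (l : List Char), PySem.Chars.replace l ("_" : String).toList (" " : String).toList
      = pvRep '_' [] [' '] l :=
    fun l => replace_eq_pvRep l '_' [] [' ']
  have hlist : (replace_keywords text).toList = pvScanB text.toList := by
    rw [hA, PySem.Str.toList_replace, PySem.Str.toList_replace, PySem.Str.toList_replace,
        PySem.Str.toList_replace]
    rw [e1, e2, e3, e4]
    exact comp_eq_scan text.toList.length text.toList le_rfl
  calc replace_keywords text
      = String.ofList ((replace_keywords text).toList) := String.ofList_toList.symm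
    _ = String.ofList (pvScanB text.toList) := by rw [hlist]
    _ = replace_keywords_alt text := rfl
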